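-- pv_equiv track=rewrite | github.com/firepao/degree_scheme_1 | scheme_1/TPLC_Net/tplc_algo/data/greenhouse_dataset.py | _find_time_col
-- ===== SOURCE A (Python) =====
-- from typing import Iterable, Sequence
--
-- def _find_time_col(columns: Iterable[str]) -> str:
--     candidates: list[str] = []
--     for col in columns:
--         c = str(col).strip().lower()
--         c = c.replace(" ", "")
--         if c in {"%time", "time", "%time,"} or c.startswith("%time") or c == "%time":
--             candidates.append(col)
--         elif c in {"%time", "%time", "%time,"}:
--             candidates.append(col)
--         elif c.startswith("%time") or c.endswith("time") or "time" in c: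
--             candidates.append(col)
--     if not candidates:
--         raise ValueError("未找到时间列（包含 time/%time 的列名）。")
--     # 优先选择看起来最标准的 %time / %Time
--     candidates_sorted = sorted(candidates, key=lambda x: (str(x).strip().lower().replace(" ", "") != "%time", len(str(x))))
--     return candidates_sorted[0]
-- ===== SOURCE B (Python) =====
-- def _find_time_col(columns):
--     # single streaming pass: no candidate list, no sort; keep the best exact
--     # "%time" match and the best overall time-ish match seen so far
--     best_exact = None
--     best_any = None
--     for col in columns:
--         c = str(col).strip().lower().replace(" ", "")
--         if "time" not in c:
--             continue
--         if best_any is None or len(str(col)) < len(str(best_any)):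
--             best_any = col
--         if c == "%time" and (best_exact is None or len(str(col)) < len(str(best_exact))):
--             best_exact = col
--     if best_any is None:
--         raise ValueError("未找到时间列（包含 time/%time 的列名）。")
--     return best_any if best_exact is None else best_exact
-- ===== Notes on version B (the rewrite author's own statement) =====
-- stated objective: simpler
-- what changed: Replaces A's collect-all-candidates-then-sort-by-composite-key pipeline (redundant branch chain, list build, stable sort, take head) by a single streaming pass that never materialises a candidate list: two running minima (shortest column whose normalized name is exactly '%time', and shortest time-containing column overall) are maintained with strict-< updates so first occurrence wins ties, and the exact one is preferred at the end.
import Mathlib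
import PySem

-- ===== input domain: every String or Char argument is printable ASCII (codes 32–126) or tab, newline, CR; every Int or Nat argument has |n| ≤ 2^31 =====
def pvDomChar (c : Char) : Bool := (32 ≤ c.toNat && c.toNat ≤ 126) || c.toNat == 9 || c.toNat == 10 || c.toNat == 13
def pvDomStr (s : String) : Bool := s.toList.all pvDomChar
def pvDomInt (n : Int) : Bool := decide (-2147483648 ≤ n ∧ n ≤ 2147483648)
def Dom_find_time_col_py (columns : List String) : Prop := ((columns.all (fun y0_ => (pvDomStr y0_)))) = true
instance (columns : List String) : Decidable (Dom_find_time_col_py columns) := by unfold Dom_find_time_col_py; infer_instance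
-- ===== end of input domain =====

-- B replaces A's collect-then-sort (branch chain + composite-key sort) by one streaming
-- pass keeping two running minima (best exact "%time" / best overall); objective: simpler.


-- ===== PORT A =====
-- Literal port of A. 'c in {...}' is ported as the disjunction of equalities; the sort
-- key's bool component (c != "%time") is ported as Nat 0/1 (False < True); the final
-- 'candidates_sorted[0]' is headD "" — the [] case is Python's ValueError, excluded by Pre_.
def find_time_col_py (columns : List String) : String :=
  let candidates : List String := columns.foldl (fun acc col =>
    let c := PySem.Str.lower (PySem.Str.strip col)
    let c := PySem.Str.replace c " " ""
    if (c == "%time" || c == "time" || c == "%time,") || PySem.Str.startswith c "%time" || c == "%time" then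
      acc ++ [col]
    else if (c == "%time" || c == "%time" || c == "%time,") then
      acc ++ [col]
    else if PySem.Str.startswith c "%time" || PySem.Str.endswith c "time" || PySem.Str.isIn "time" c then
      acc ++ [col]
    else acc) []
  if candidates.isEmpty then ""  -- Python: raise ValueError (excluded by Pre_)
  else
    let candidates_sorted := PySem.List.sorted2 candidates
      (fun x => if PySem.Str.replace (PySem.Str.lower (PySem.Str.strip x)) " " "" == "%time" then (0 : Nat) else 1)
      (fun x => PySem.Str.len x)
    candidates_sorted.headD ""

-- ===== PORT B =====
-- B-side helper: str(col).strip().lower().replace(" ", "")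
def pvNorm (col : String) : String :=
  PySem.Str.replace (PySem.Str.lower (PySem.Str.strip col)) " " ""

-- B's loop body helper: 'best is None or len(col) < len(best)' running-minimum update
def pvBetter (b : Option String) (col : String) : Option String :=
  match b with
  | none => some col
  | some b => if PySem.Str.len col < PySem.Str.len b then some col else some b

-- B's loop body: update the two running minima (best_exact, best_any)
def pvStepB (st : Option String × Option String) (col : String) : Option String × Option String :=
  let c := pvNorm col
  if PySem.Str.isIn "time" c then
    ((if c == "%time" then pvBetter st.1 col else st.1), pvBetter st.2 col)
  else st

def find_time_col_py_alt (columns : List String) : String :=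
  let st := columns.foldl pvStepB (none, none)
  match st.2 with
  | none => ""  -- Python: raise ValueError (excluded by Pre_)
  | some a =>
    match st.1 with
    | none => a
    | some e => e

-- ===== PRECONDITION & SPEC =====
-- Pre_: some column's normalized form contains "time"; otherwise A raises ValueError.
def Pre_find_time_col_py (columns : List String) : Prop :=
  (columns.any (fun col =>
    PySem.Str.isIn "time" (PySem.Str.replace (PySem.Str.lower (PySem.Str.strip col)) " " ""))) = true
instance (columns : List String) : Decidable (Pre_find_time_col_py columns) := by unfold Pre_find_time_col_py; infer_instance
def pvWitness_find_time_col_py : List String := ["Temp", "%Time"]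
def Spec_find_time_col_py (columns : List String) (out : String) : Prop := out = find_time_col_py_alt columns
instance (columns : List String) (out : String) : Decidable (Spec_find_time_col_py columns out) := by unfold Spec_find_time_col_py; infer_instance

-- ===== CLAIM (what is proved, stated in full; the proofs are below) =====
def Claim_equal_find_time_col_py : Prop := ∀ (columns : List String), Dom_find_time_col_py columns → Pre_find_time_col_py columns → Spec_find_time_col_py columns (find_time_col_py columns)

-- ===== LEMMAS AND PROOFS =====

-- the normalized-condition of A's branch chain collapses to 'contains "time"'
lemma pv_isIn_of_startswith (c : String) (h : PySem.Str.startswith c "%time" = true) :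
    PySem.Str.isIn "time" c = true := by
  rw [PySem.Str.isIn_iff_infix]
  rw [PySem.Str.startswith_eq, PySem.Chars.startswith_iff] at h
  exact List.IsInfix.trans (by decide) h.isInfix

lemma pv_isIn_of_endswith (c : String) (h : PySem.Str.endswith c "time" = true) :
    PySem.Str.isIn "time" c = true := by
  rw [PySem.Str.isIn_iff_infix]
  rw [PySem.Str.endswith_eq, PySem.Chars.endswith_iff] at h
  exact h.isInfix

lemma pv_cond_eq (c : String) :
    (((c == "%time" || c == "time" || c == "%time,") || PySem.Str.startswith c "%time" || c == "%time") ||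
     ((c == "%time" || c == "%time" || c == "%time,") ||
      (PySem.Str.startswith c "%time" || PySem.Str.endswith c "time" || PySem.Str.isIn "time" c)))
    = PySem.Str.isIn "time" c := by
  cases hin : PySem.Str.isIn "time" c with
  | true => simp only [Bool.or_true]
  | false =>
    have h1 : (c == "%time") = false := by
      cases h : (c == "%time") with
      | false => rfl
      | true =>
        have hc : c = "%time" := by simpa using h
        subst hc; exact absurd hin (by decide)
    have h2 : (c == "time") = false := by
      cases h : (c == "time") with
      | false => rfl
      | true =>
        have hc : c = "time" := by simpa using h
        subst hc; exact absurd hin (by decide)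
    have h3 : (c == "%time,") = false := by
      cases h : (c == "%time,") with
      | false => rfl
      | true =>
        have hc : c = "%time," := by simpa using h
        subst hc; exact absurd hin (by decide)
    have h4 : PySem.Str.startswith c "%time" = false := by
      cases h : PySem.Str.startswith c "%time" with
      | false => rfl
      | true => rw [pv_isIn_of_startswith c h] at hin; exact absurd hin (by simp)
    have h5 : PySem.Str.endswith c "time" = false := by
      cases h : PySem.Str.endswith c "time" with
      | false => rfl
      | true => rw [pv_isIn_of_endswith c h] at hin; exact absurd hin (by simp)
    have h4' : PySem.Chars.startswith c.toList ['%', 't', 'i', 'm', 'e'] = false := by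
      have := h4; rw [PySem.Str.startswith_eq] at this; exact this
    have h5' : PySem.Chars.endswith c.toList ['t', 'i', 'm', 'e'] = false := by
      have := h5; rw [PySem.Str.endswith_eq] at this; exact this
    have hin' : PySem.Chars.isIn ['t', 'i', 'm', 'e'] c.toList = false := by
      have := hin; rw [PySem.Str.isIn_eq] at this; exact this
    simp [h1, h2, h3, h4', h5']

-- head of an insertion = comparison with the old head
def pvStep {α : Type} (lt : α → α → Bool) (m : Option α) (x : α) : Option α :=
  match m with
  | none => some x
  | some h => some (if lt x h then x else h)

lemma pv_head?_insertBy {α : Type} (lt : α → α → Bool) (x : α) (acc : List α) :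
    (PySem.List.insertBy lt x acc).head? = pvStep lt acc.head? x := by
  cases acc with
  | nil => rfl
  | cons h t => simp only [PySem.List.insertBy, pvStep, List.head?_cons]; split <;> simp_all

lemma pv_head?_foldl {α : Type} (lt : α → α → Bool) (l : List α) (acc : List α) :
    (l.foldl (fun a x => PySem.List.insertBy lt x a) acc).head? = l.foldl (pvStep lt) acc.head? := by
  induction l generalizing acc with
  | nil => rfl
  | cons x t ih => simpa [pv_head?_insertBy] using ih (PySem.List.insertBy lt x acc)

lemma pv_min?_cons₂ {α : Type} (k2 : α → Int) (m x : α) (l : List α) :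
    PySem.List.min? (m :: x :: l) k2 = PySem.List.min? ((if k2 x < k2 m then x else m) :: l) k2 := by
  by_cases h : k2 x < k2 m <;> simp [PySem.List.min?, h]

-- head of the lex-(tier, k2) minimum fold = min over the q-tier if nonempty, else over all
lemma pvStep_some {α : Type} (lt : α → α → Bool) (h x : α) :
    pvStep lt (some h) x = some (if lt x h then x else h) := rfl

lemma pv_tier {α : Type} (q : α → Bool) (k2 : α → Int) (l : List α) (m : α) :
    l.foldl (pvStep (fun a b =>
        decide ((if q a then (0 : Nat) else 1) < (if q b then (0 : Nat) else 1)) ||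
        (!decide ((if q b then (0 : Nat) else 1) < (if q a then (0 : Nat) else 1)) &&
         decide (k2 a < k2 b)))) (some m)
    = PySem.List.min? (if ((m :: l).filter q).isEmpty then m :: l else (m :: l).filter q) k2 := by
  induction l generalizing m with
  | nil => by_cases h : q m = true <;> simp [h, PySem.List.min?]
  | cons x t ih =>
    rw [List.foldl_cons, pvStep_some, ih]
    by_cases hm : q m = true <;> by_cases hx : q x = true
    · -- both tier-0: comparison is by k2, winner stays in the tier
      simp only [hm, hx, if_pos, List.filter_cons, lt_self_iff_false, decide_false,
        Bool.false_or, Bool.not_false, Bool.true_and, decide_eq_true_eq]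
      have hqw : q (if k2 x < k2 m then x else m) = true := by split <;> assumption
      simp only [hqw, if_pos, List.isEmpty_cons, Bool.false_eq_true, if_neg, not_false_iff]
      rw [pv_min?_cons₂ k2 m x]
    · -- m in tier 0, x in tier 1: m wins, x filtered out
      simp [hm, hx]
    · -- x in tier 0, m in tier 1: x wins, m filtered out
      simp [hm, hx]
    · -- both tier-1: comparison is by k2, filter unchanged
      simp only [hm, hx, if_neg, Bool.false_eq_true, not_false_iff, List.filter_cons,
        lt_self_iff_false, decide_false, Bool.false_or, Bool.not_false, Bool.true_and,
        decide_eq_true_eq]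
      have hqw : q (if k2 x < k2 m then x else m) = false := by
        split <;> simp_all
      by_cases hemp : (t.filter q).isEmpty = true
      · simp [hqw, hemp]
        rw [pv_min?_cons₂ k2 m x]
      · simp [hemp, hqw]

lemma pv_headD_eq (l : List String) (d : String) : l.headD d = l.head?.getD d := by
  cases l <;> rfl

-- A's loop body: the branch chain appends iff the normalized name contains "time"
lemma pv_bodyA_eq (acc : List String) (col : String) :
    (if (PySem.Str.replace (PySem.Str.lower (PySem.Str.strip col)) " " "" == "%time" ||
         PySem.Str.replace (PySem.Str.lower (PySem.Str.strip col)) " " "" == "time" ||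
         PySem.Str.replace (PySem.Str.lower (PySem.Str.strip col)) " " "" == "%time,") ||
        PySem.Str.startswith (PySem.Str.replace (PySem.Str.lower (PySem.Str.strip col)) " " "") "%time" ||
        PySem.Str.replace (PySem.Str.lower (PySem.Str.strip col)) " " "" == "%time" then
       acc ++ [col]
     else if (PySem.Str.replace (PySem.Str.lower (PySem.Str.strip col)) " " "" == "%time" ||
              PySem.Str.replace (PySem.Str.lower (PySem.Str.strip col)) " " "" == "%time" ||
              PySem.Str.replace (PySem.Str.lower (PySem.Str.strip col)) " " "" == "%time,") then
       acc ++ [col]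
     else if PySem.Str.startswith (PySem.Str.replace (PySem.Str.lower (PySem.Str.strip col)) " " "") "%time" ||
             PySem.Str.endswith (PySem.Str.replace (PySem.Str.lower (PySem.Str.strip col)) " " "") "time" ||
             PySem.Str.isIn "time" (PySem.Str.replace (PySem.Str.lower (PySem.Str.strip col)) " " "") then
       acc ++ [col]
     else acc)
    = if PySem.Str.isIn "time" (pvNorm col) then acc ++ [col] else acc := by
  rw [show PySem.Str.isIn "time" (pvNorm col)
        = PySem.Str.isIn "time" (PySem.Str.replace (PySem.Str.lower (PySem.Str.strip col)) " " "") from rfl,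
      ← pv_cond_eq (PySem.Str.replace (PySem.Str.lower (PySem.Str.strip col)) " " "")]
  cases (PySem.Str.replace (PySem.Str.lower (PySem.Str.strip col)) " " "" == "%time") <;>
    cases (PySem.Str.replace (PySem.Str.lower (PySem.Str.strip col)) " " "" == "time") <;>
    cases (PySem.Str.replace (PySem.Str.lower (PySem.Str.strip col)) " " "" == "%time,") <;>
    cases PySem.Str.startswith (PySem.Str.replace (PySem.Str.lower (PySem.Str.strip col)) " " "") "%time" <;>
    cases PySem.Str.endswith (PySem.Str.replace (PySem.Str.lower (PySem.Str.strip col)) " " "") "time" <;>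
    cases PySem.Str.isIn "time" (PySem.Str.replace (PySem.Str.lower (PySem.Str.strip col)) " " "") <;>
    rfl

lemma pv_sorted2_head? {α : Type} (q : α → Bool) (k2 : α → Int) (y : α) (t : List α) :
    (PySem.List.sorted2 (y :: t) (fun a => if q a then (0 : Nat) else 1) k2).head? =
    PySem.List.min? (if ((y :: t).filter q).isEmpty then y :: t else (y :: t).filter q) k2 := by
  simp only [PySem.List.sorted2, Bool.false_eq_true, if_neg, not_false_iff]
  rw [pv_head?_foldl, List.foldl_cons]
  exact pv_tier q k2 t y

-- abbreviation used only in the proofs: the length-ordered running minimum step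
def pvLtLen (x h : String) : Bool := decide (PySem.Str.len x < PySem.Str.len h)

-- a normalized name equal to "%time" contains "time"
lemma pv_exact_isIn (col : String) (h : (pvNorm col == "%time") = true) :
    PySem.Str.isIn "time" (pvNorm col) = true := by
  have hc : pvNorm col = "%time" := by simpa using h
  rw [hc]; decide

-- the update helper is the pvStep of the length order
lemma pv_better_eq (m : Option String) (col : String) :
    pvBetter m col = pvStep pvLtLen m col := by
  cases m with
  | none => rfl
  | some b =>
    simp only [pvBetter, pvStep, pvLtLen, decide_eq_true_eq]
    exact (apply_ite some _ _ _).symm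

-- B's single fold computes the two filtered running minima at once
lemma pv_foldB_pair (cols : List String) (e a : Option String) :
    cols.foldl pvStepB (e, a) =
      ((cols.filter (fun col => pvNorm col == "%time")).foldl (pvStep pvLtLen) e,
       (cols.filter (fun col => PySem.Str.isIn "time" (pvNorm col))).foldl (pvStep pvLtLen) a) := by
  induction cols generalizing e a with
  | nil => rfl
  | cons x t ih =>
    by_cases hin : PySem.Str.isIn "time" (pvNorm x) = true
    · by_cases hex : (pvNorm x == "%time") = true
      · simp only [List.foldl_cons, List.filter_cons, hin, hex, if_pos]
        rw [show pvStepB (e, a) x = (pvStep pvLtLen e x, pvStep pvLtLen a x) by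
            simp only [pvStepB, hin, hex, if_pos, pv_better_eq]]
        exact ih _ _
      · simp only [List.foldl_cons, List.filter_cons, hin, hex, if_pos,
          Bool.false_eq_true, if_neg, not_false_iff]
        rw [show pvStepB (e, a) x = (e, pvStep pvLtLen a x) by
            simp only [pvStepB, hin, hex, if_pos, Bool.false_eq_true, if_neg,
              not_false_iff, pv_better_eq]]
        exact ih _ _
    · have hex : (pvNorm x == "%time") = false := by
        cases h : (pvNorm x == "%time") with
        | false => rfl
        | true => exact absurd (pv_exact_isIn x h) hin
      have hin' : PySem.Str.isIn "time" (pvNorm x) = false := by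
        cases h : PySem.Str.isIn "time" (pvNorm x) with
        | false => rfl
        | true => exact absurd h hin
      simp only [List.foldl_cons, List.filter_cons, hin', hex, Bool.false_eq_true,
        if_neg, not_false_iff]
      rw [show pvStepB (e, a) x = (e, a) by
          simp only [pvStepB, hin', Bool.false_eq_true, if_neg, not_false_iff]]
      exact ih e a

-- the running-minimum fold computes min? (first minimal element)
lemma pv_foldl_min_some (t : List String) (m : String) :
    t.foldl (pvStep pvLtLen) (some m) = PySem.List.min? (m :: t) (fun x => PySem.Str.len x) := by
  induction t generalizing m with
  | nil => simp [PySem.List.min?]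
  | cons x l ih =>
    rw [List.foldl_cons, pvStep_some,
        pv_min?_cons₂ (fun x => PySem.Str.len x) m x l, ← ih]
    by_cases h : PySem.Str.len x < PySem.Str.len m <;> simp [pvLtLen]

lemma pv_foldl_min_none (l : List String) :
    l.foldl (pvStep pvLtLen) none = PySem.List.min? l (fun x => PySem.Str.len x) := by
  cases l with
  | nil => simp [PySem.List.min?]
  | cons m t =>
    rw [List.foldl_cons]
    exact pv_foldl_min_some t m

-- equality implies membership in the broader filter: the double filter collapses
lemma pv_filter_exact (columns : List String) :
    (columns.filter (fun col => PySem.Str.isIn "time" (pvNorm col))).filter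
        (fun col => pvNorm col == "%time")
      = columns.filter (fun col => pvNorm col == "%time") := by
  induction columns with
  | nil => rfl
  | cons x t ih =>
    by_cases hex : (pvNorm x == "%time") = true
    · have hin := pv_exact_isIn x hex
      simp only [List.filter_cons, hex, hin, if_pos, ih]
    · have hex' : (pvNorm x == "%time") = false := by
        cases h : (pvNorm x == "%time") with
        | false => rfl
        | true => exact absurd h hex
      by_cases hin : PySem.Str.isIn "time" (pvNorm x) = true
      · simp only [List.filter_cons, hex', hin, if_pos, Bool.false_eq_true,
          if_neg, not_false_iff, ih]
      · have hin' : PySem.Str.isIn "time" (pvNorm x) = false := by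
          cases h : PySem.Str.isIn "time" (pvNorm x) with
          | false => rfl
          | true => exact absurd h hin
        simp only [List.filter_cons, hex', hin', Bool.false_eq_true,
          if_neg, not_false_iff, ih]

-- ===== VERDICT (by name: the statement is the Claim_ definition above) =====
theorem find_time_col_py_spec : Claim_equal_find_time_col_py := by
  intro columns hdom hpre
  unfold Spec_find_time_col_py find_time_col_py find_time_col_py_alt
  simp only []
  simp only [pv_bodyA_eq]
  rw [PySem.List.foldl_append_if_eq_filter]
  simp only [List.nil_append]
  rw [pv_foldB_pair columns none none, pv_foldl_min_none, pv_foldl_min_none,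
      ← pv_filter_exact columns]
  have hne : columns.filter (fun col => PySem.Str.isIn "time" (pvNorm col)) ≠ [] := by
    unfold Pre_find_time_col_py at hpre
    simp only [List.any_eq_true] at hpre
    obtain ⟨x, hx, hpx⟩ := hpre
    intro h
    have := List.filter_eq_nil_iff.mp h x hx
    exact this (by simpa [pvNorm] using hpx)
  cases hc : columns.filter (fun col => PySem.Str.isIn "time" (pvNorm col)) with
  | nil => exact absurd hc hne
  | cons y t =>
    simp only [List.isEmpty_cons, Bool.false_eq_true, if_neg, not_false_iff]
    rw [pv_headD_eq,
        pv_sorted2_head? (fun x => PySem.Str.replace (PySem.Str.lower (PySem.Str.strip x)) " " "" == "%time")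
          (fun x => PySem.Str.len x) y t]
    -- both sides are now expressed through min? over (y::t) and its exact-tier filter
    have hany : ∃ v, PySem.List.min? (y :: t) (fun x => PySem.Str.len x) = some v := by
      cases h : PySem.List.min? (y :: t) (fun x => PySem.Str.len x) with
      | none => exact absurd ((PySem.List.min?_eq_none_iff _ _).mp h) (by exact List.cons_ne_nil y t)
      | some v => exact ⟨v, rfl⟩
    obtain ⟨v, hv⟩ := hany
    by_cases hemp : ((y :: t).filter (fun col => pvNorm col == "%time")).isEmpty = true
    · have hnone : PySem.List.min? ((y :: t).filter (fun col => pvNorm col == "%time"))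
          (fun x => PySem.Str.len x) = none := by
        rw [PySem.List.min?_eq_none_iff _ _]
        exact List.isEmpty_iff.mp hemp
      have hqeq : ((y :: t).filter
          (fun x => PySem.Str.replace (PySem.Str.lower (PySem.Str.strip x)) " " "" == "%time"))
          = ((y :: t).filter (fun col => pvNorm col == "%time")) := rfl
      rw [hqeq]
      simp only [hemp, if_pos, hnone, hv, Option.getD_some]
    · have hq : ((y :: t).filter (fun col => pvNorm col == "%time")) ≠ [] := by
        intro h; rw [h] at hemp; exact hemp rfl
      have hsome : ∃ w, PySem.List.min? ((y :: t).filter (fun col => pvNorm col == "%time"))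
          (fun x => PySem.Str.len x) = some w := by
        cases h : PySem.List.min? ((y :: t).filter (fun col => pvNorm col == "%time"))
            (fun x => PySem.Str.len x) with
        | none => exact absurd ((PySem.List.min?_eq_none_iff _ _).mp h) hq
        | some w => exact ⟨w, rfl⟩
      obtain ⟨w, hw⟩ := hsome
      have hqeq : ((y :: t).filter
          (fun x => PySem.Str.replace (PySem.Str.lower (PySem.Str.strip x)) " " "" == "%time"))
          = ((y :: t).filter (fun col => pvNorm col == "%time")) := rfl
      rw [hqeq]
      simp only [hemp, if_neg, Bool.false_eq_true, not_false_iff, hw, hv, Option.getD_some]
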